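-- pv_equiv track=rewrite | github.com/JeremyKalfus/AutoMath | artifacts/r3-p11-three-color-path-ramsey/structured_family_check.py | component_masks
-- ===== SOURCE A (Python) =====
-- def bit_iter(mask):
--     while mask:
--         lsb = mask & -mask
--         yield lsb.bit_length() - 1
--         mask ^= lsb
--
-- def component_masks(adj):
--     n = len(adj)
--     unseen = (1 << n) - 1
--     comps = []
--     while unseen:
--         lsb = unseen & -unseen
--         start = lsb.bit_length() - 1
--         stack = [start]
--         comp = 0
--         unseen ^= lsb
--         while stack:
--             v = stack.pop()
--             bit = 1 << v
--             if comp & bit: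
--                 continue
--             comp |= bit
--             nbrs = adj[v] & unseen
--             unseen &= ~nbrs
--             stack.extend(bit_iter(nbrs))
--         comps.append(comp)
--     return comps
-- ===== SOURCE B (Python) =====
-- def component_masks(adj):
--     # Level-synchronized BFS: each component grows by OR-ing the adjacency
--     # masks of the whole current frontier at once, instead of a per-vertex
--     # stack with a revisit guard.
--     n = len(adj)
--     unseen = (1 << n) - 1
--     comps = []
--     while unseen:
--         start_bit = unseen & -unseen
--         unseen ^= start_bit
--         comp = start_bit
--         frontier = start_bit
--         while frontier:
--             new = 0
--             f = frontier
--             while f: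
--                 b = f & -f
--                 new |= adj[b.bit_length() - 1]
--                 f ^= b
--             new &= unseen
--             unseen &= ~new
--             comp |= new
--             frontier = new
--         comps.append(comp)
--     return comps
-- ===== Notes on version B (the rewrite author's own statement) =====
-- stated objective: alternative
-- what changed: Replaces the per-vertex stack DFS with its revisit guard by a level-synchronized BFS that keeps a single frontier bitmask and expands a whole level at once by OR-ing the adjacency masks of all frontier vertices.
import Mathlib
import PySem

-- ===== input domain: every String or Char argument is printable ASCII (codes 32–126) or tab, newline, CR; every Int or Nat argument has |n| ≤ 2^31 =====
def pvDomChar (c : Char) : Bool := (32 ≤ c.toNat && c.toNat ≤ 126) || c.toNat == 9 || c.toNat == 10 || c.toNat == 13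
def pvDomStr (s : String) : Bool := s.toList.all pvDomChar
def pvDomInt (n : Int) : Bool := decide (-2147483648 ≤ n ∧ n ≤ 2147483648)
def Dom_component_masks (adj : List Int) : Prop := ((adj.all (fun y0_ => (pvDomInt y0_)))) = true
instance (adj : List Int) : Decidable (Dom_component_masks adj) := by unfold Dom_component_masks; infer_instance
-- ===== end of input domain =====

-- B replaces A's per-vertex stack DFS (with its revisit guard) by a level-synchronized
-- frontier-bitmask BFS; same return value, a genuinely different traversal (objective: alternative).

-- ===== PORT A =====

-- Port of the generator bit_iter(mask): yields the set-bit indices of mask, lowest first.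
-- fuel only makes the recursion structural; it never cuts the loop short at call sites.
def bitIter (fuel : Nat) (mask : Int) : List Nat :=
  match fuel with
  | 0 => []
  | f + 1 =>
    if mask = 0 then []
    else
      let lsb := PySem.Int.band mask (-mask)
      (PySem.Int.bitLength lsb - 1) :: bitIter f (PySem.Int.bxor mask lsb)

-- Inner DFS loop of A.  The Python stack pops/extends at its END; here the list head is
-- the stack top, so extend(bit_iter(nbrs)) becomes (bitIter … nbrs).reverse ++ rest.
def aloop (adj : List Int) (fuel : Nat) (stack : List Nat) (comp unseen : Int) : Int × Int :=
  match fuel, stack with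
  | 0, _ => (comp, unseen)
  | _ + 1, [] => (comp, unseen)
  | f + 1, v :: rest =>
    let bit : Int := (1 : Int) <<< v
    if PySem.Int.band comp bit ≠ 0 then
      aloop adj f rest comp unseen
    else
      let comp' := PySem.Int.bor comp bit
      let nbrs := PySem.Int.band (PySem.List.pyGetD adj (v : Int) 0) unseen
      let unseen' := PySem.Int.band unseen (Int.not nbrs)
      aloop adj f ((bitIter (nbrs.toNat + 1) nbrs).reverse ++ rest) comp' unseen'

def aouter (adj : List Int) (fuel : Nat) (unseen : Int) (comps : List Int) : List Int :=
  match fuel with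
  | 0 => comps
  | f + 1 =>
    if unseen = 0 then comps
    else
      let lsb := PySem.Int.band unseen (-unseen)
      let start := PySem.Int.bitLength lsb - 1
      let unseen' := PySem.Int.bxor unseen lsb
      let r := aloop adj (2 * unseen'.toNat + 2) [start] 0 unseen'
      aouter adj f r.2 (comps ++ [r.1])

def component_masks (adj : List Int) : List Int :=
  aouter adj (adj.length + 1) ((1 : Int) <<< adj.length - 1) []

-- ===== PORT B =====
-- Inner bit loop of B: OR together adj[v] over the set bits v of f.
def orFrontier (adj : List Int) (fuel : Nat) (f : Int) (acc : Int) : Int :=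
  match fuel with
  | 0 => acc
  | fu + 1 =>
    if f = 0 then acc
    else
      let b := PySem.Int.band f (-f)
      orFrontier adj fu (PySem.Int.bxor f b)
        (PySem.Int.bor acc (PySem.List.pyGetD adj ((PySem.Int.bitLength b - 1 : Nat) : Int) 0))

-- Level-synchronized BFS loop of B: expand the whole frontier at once.
def bloop (adj : List Int) (fuel : Nat) (frontier comp unseen : Int) : Int × Int :=
  match fuel with
  | 0 => (comp, unseen)
  | f + 1 =>
    if frontier = 0 then (comp, unseen)
    else
      let nw := PySem.Int.band (orFrontier adj (frontier.toNat + 1) frontier 0) unseen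
      let unseen' := PySem.Int.band unseen (Int.not nw)
      bloop adj f nw (PySem.Int.bor comp nw) unseen'

def bouter (adj : List Int) (fuel : Nat) (unseen : Int) (comps : List Int) : List Int :=
  match fuel with
  | 0 => comps
  | f + 1 =>
    if unseen = 0 then comps
    else
      let startBit := PySem.Int.band unseen (-unseen)
      let unseen' := PySem.Int.bxor unseen startBit
      let r := bloop adj (unseen'.toNat + 2) startBit startBit unseen'
      bouter adj f r.2 (comps ++ [r.1])

def component_masks_alt (adj : List Int) : List Int :=
  bouter adj (adj.length + 1) ((1 : Int) <<< adj.length - 1) []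


-- ===== PRECONDITION & SPEC =====
def Spec_component_masks (adj : List Int) (out : List Int) : Prop := out = component_masks_alt adj
instance (adj : List Int) (out : List Int) : Decidable (Spec_component_masks adj out) := by unfold Spec_component_masks; infer_instance

-- ===== CLAIM (what is proved, stated in full; the proofs are below) =====
def Claim_equal_component_masks : Prop := ∀ (adj : List Int), Dom_component_masks adj → Spec_component_masks adj (component_masks adj)

-- ===== LEMMAS AND PROOFS =====

-- Bit-level toolkit: bitOf a v is the v-th bit of the (infinite two's complement) integer a.
def bitOf (a : Int) (v : Nat) : Bool :=
  if 0 ≤ a then a.toNat.testBit v else !((-a - 1).toNat.testBit v)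

theorem bitOf_natCast (n : Nat) (v : Nat) : bitOf (n : Int) v = n.testBit v := by
  simp [bitOf]

theorem bitOf_of_nonneg {a : Int} (h : 0 ≤ a) (v : Nat) : bitOf a v = a.toNat.testBit v := by
  simp [bitOf, h]

theorem bitOf_negSucc (n : Nat) (v : Nat) : bitOf (-(n : Int) - 1) v = !(n.testBit v) := by
  have h : ¬ (0 ≤ -(n : Int) - 1) := by omega
  simp only [bitOf, if_neg h]
  norm_num

theorem and_mod_two (y m : Nat) : (y &&& m) % 2 = y % 2 * (m % 2) := by
  have := Nat.testBit_land y m 0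
  simp only [Nat.testBit_zero] at this
  have h2 : (y &&& m) % 2 < 2 := Nat.mod_lt _ (by norm_num)
  have hy2 : y % 2 < 2 := Nat.mod_lt _ (by norm_num)
  have hm2 : m % 2 < 2 := Nat.mod_lt _ (by norm_num)
  interval_cases h : (y &&& m) % 2 <;> interval_cases h' : y % 2 <;> interval_cases h'' : m % 2 <;>
    simp_all

theorem and_div_two (y m : Nat) : (y &&& m) / 2 = (y / 2) &&& (m / 2) := by
  apply Nat.eq_of_testBit_eq
  intro i
  rw [← Nat.testBit_add_one, Nat.testBit_land, Nat.testBit_add_one, Nat.testBit_add_one,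
    ← Nat.testBit_land]

theorem testBit_sub_and (y m v : Nat) :
    (y - (y &&& m)).testBit v = (y.testBit v && !(m.testBit v)) := by
  induction v generalizing y m with
  | zero =>
    have h1 := and_mod_two y m
    have h2 : y &&& m ≤ y := Nat.and_le_left
    have h3 : (y &&& m) / 2 ≤ y / 2 := by rw [and_div_two]; exact Nat.and_le_left
    simp only [Nat.testBit_zero]
    have hy := Nat.div_add_mod y 2
    have hx := Nat.div_add_mod (y &&& m) 2
    have hy2 : y % 2 < 2 := Nat.mod_lt _ (by norm_num)
    have hm2 : m % 2 < 2 := Nat.mod_lt _ (by norm_num)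
    interval_cases h : y % 2 <;> interval_cases h' : m % 2 <;> simp_all <;> omega
  | succ v ih =>
    rw [Nat.testBit_add_one, Nat.testBit_add_one, Nat.testBit_add_one]
    have h1 := and_mod_two y m
    have h2 : y &&& m ≤ y := Nat.and_le_left
    have h3 : (y &&& m) / 2 ≤ y / 2 := by rw [and_div_two]; exact Nat.and_le_left
    have key : (y - (y &&& m)) / 2 = y / 2 - (y / 2 &&& m / 2) := by
      rw [← and_div_two]
      have hy := Nat.div_add_mod y 2
      have hx := Nat.div_add_mod (y &&& m) 2
      have hs := Nat.div_add_mod (y - (y &&& m)) 2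
      have hm2 : m % 2 < 2 := Nat.mod_lt _ (by norm_num)
      have hy2 : y % 2 < 2 := Nat.mod_lt _ (by norm_num)
      have hs2 : (y - (y &&& m)) % 2 < 2 := Nat.mod_lt _ (by norm_num)
      have h4 : (y &&& m) % 2 ≤ y % 2 := by
        rw [h1]
        calc y % 2 * (m % 2) ≤ y % 2 * 1 := Nat.mul_le_mul_left _ (by omega)
        _ = y % 2 := Nat.mul_one _
      omega
    rw [key, ih]

theorem int_not_eq (a : Int) : Int.not a = -a - 1 := by
  cases a with
  | ofNat n => simp [Int.not, Int.negSucc_eq]; ring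
  | negSucc n => simp [Int.not, Int.negSucc_eq]

theorem bitOf_band (a b : Int) (v : Nat) :
    bitOf (PySem.Int.band a b) v = (bitOf a v && bitOf b v) := by
  have hA : ¬ 0 ≤ a → bitOf a v = !((-a - 1).toNat.testBit v) := fun h => by simp [bitOf, h]
  have hB : ¬ 0 ≤ b → bitOf b v = !((-b - 1).toNat.testBit v) := fun h => by simp [bitOf, h]
  unfold PySem.Int.band
  by_cases ha : 0 ≤ a <;> by_cases hb : 0 ≤ b
  · simp only [if_pos ha, if_pos hb]
    rw [bitOf_natCast, Nat.testBit_land, bitOf_of_nonneg ha, bitOf_of_nonneg hb]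
  · simp only [if_pos ha, if_neg hb]
    rw [bitOf_natCast, testBit_sub_and, bitOf_of_nonneg ha, hB hb]
  · simp only [if_neg ha, if_pos hb]
    rw [bitOf_natCast, testBit_sub_and, bitOf_of_nonneg hb, hA ha]
    cases bitOf a v <;> cases b.toNat.testBit v <;> simp_all
  · simp only [if_neg ha, if_neg hb]
    rw [bitOf_negSucc, Nat.testBit_lor, hA ha, hB hb]
    cases (-a - 1).toNat.testBit v <;> cases (-b - 1).toNat.testBit v <;> simp

theorem bitOf_bor (a b : Int) (v : Nat) :
    bitOf (PySem.Int.bor a b) v = (bitOf a v || bitOf b v) := by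
  have hA : ¬ 0 ≤ a → bitOf a v = !((-a - 1).toNat.testBit v) := fun h => by simp [bitOf, h]
  have hB : ¬ 0 ≤ b → bitOf b v = !((-b - 1).toNat.testBit v) := fun h => by simp [bitOf, h]
  unfold PySem.Int.bor
  by_cases ha : 0 ≤ a <;> by_cases hb : 0 ≤ b
  · simp only [if_pos ha, if_pos hb]
    rw [bitOf_natCast, Nat.testBit_lor, bitOf_of_nonneg ha, bitOf_of_nonneg hb]
  · simp only [if_pos ha, if_neg hb]
    rw [bitOf_negSucc, testBit_sub_and, bitOf_of_nonneg ha, hB hb]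
    cases bitOf a v <;> cases (-b - 1).toNat.testBit v <;> simp_all [bitOf_of_nonneg ha]
  · simp only [if_neg ha, if_pos hb]
    rw [bitOf_negSucc, testBit_sub_and, bitOf_of_nonneg hb, hA ha]
    cases (-a - 1).toNat.testBit v <;> cases b.toNat.testBit v <;> simp_all [bitOf_of_nonneg hb]
  · simp only [if_neg ha, if_neg hb]
    rw [bitOf_negSucc, Nat.testBit_land, hA ha, hB hb]
    cases (-a - 1).toNat.testBit v <;> cases (-b - 1).toNat.testBit v <;> simp

theorem band_nonneg_left {a : Int} (b : Int) (h : 0 ≤ a) : 0 ≤ PySem.Int.band a b := by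
  unfold PySem.Int.band
  by_cases hb : 0 ≤ b <;> simp [h, hb]

theorem band_nonneg_right (a : Int) {b : Int} (h : 0 ≤ b) : 0 ≤ PySem.Int.band a b := by
  rw [PySem.Int.band_comm]; exact band_nonneg_left a h

theorem bor_nonneg {a b : Int} (ha : 0 ≤ a) (hb : 0 ≤ b) : 0 ≤ PySem.Int.bor a b := by
  unfold PySem.Int.bor
  simp [ha, hb]

theorem band_not_val {u x : Int} (hu : 0 ≤ u) (hx : 0 ≤ x) :
    PySem.Int.band u (Int.not x) = ((u.toNat - (u.toNat &&& x.toNat) : Nat) : Int) := by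
  rw [int_not_eq]
  have hneg : ¬ 0 ≤ -x - 1 := by omega
  unfold PySem.Int.band
  rw [if_pos hu, if_neg hneg]
  have h : (-(-x - 1) - 1).toNat = x.toNat := by omega
  rw [h]

theorem land_eq_of_subset {x y : Nat} (h : ∀ v, x.testBit v = true → y.testBit v = true) :
    y &&& x = x := by
  apply Nat.eq_of_testBit_eq
  intro i
  rw [Nat.testBit_land]
  cases hx : x.testBit i
  · simp
  · simp [h i hx]

theorem xor_eq_sub_of_subset {x y : Nat} (h : ∀ v, x.testBit v = true → y.testBit v = true) :
    y ^^^ x = y - x := by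
  have hx : y &&& x = x := land_eq_of_subset h
  apply Nat.eq_of_testBit_eq
  intro i
  rw [Nat.testBit_xor]
  have := testBit_sub_and y x i
  rw [hx] at this
  rw [this]
  cases hxi : x.testBit i
  · simp
  · simp [h i hxi]

-- the lowest set bit: m - (m &&& (m-1)) is a power of two that is a bit of m
theorem nat_lsb_spec : ∀ m : Nat, 0 < m →
    ∃ k, m - (m &&& (m - 1)) = 2 ^ k ∧ m.testBit k = true := by
  intro m
  induction m using Nat.strong_induction_on with
  | _ m ih =>
    intro hm
    by_cases hodd : m % 2 = 1
    · refine ⟨0, ?_, ?_⟩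
      · have h : m &&& (m - 1) = m - 1 := by
          apply Nat.eq_of_testBit_eq
          intro i
          cases i with
          | zero =>
            simp only [Nat.testBit_zero]
            have : (m - 1) % 2 = 0 := by omega
            simp [hodd, this]
          | succ i =>
            have h0 : (m - 1) / 2 = m / 2 := by omega
            rw [Nat.testBit_land, Nat.testBit_add_one m, Nat.testBit_add_one (m - 1), h0]
            cases (m / 2).testBit i <;> simp
        omega
      · simp [Nat.testBit_zero, hodd]
    · have hm2 : m % 2 = 0 := by omega
      have hpos : 0 < m / 2 := by omega
      obtain ⟨k, hk1, hk2⟩ := ih (m / 2) (by omega) hpos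
      refine ⟨k + 1, ?_, ?_⟩
      · have h : m &&& (m - 1) = 2 * ((m / 2) &&& (m / 2 - 1)) := by
          apply Nat.eq_of_testBit_eq
          intro i
          cases i with
          | zero =>
            simp only [Nat.testBit_zero]
            have h1 : (2 * (m / 2 &&& (m / 2 - 1))) % 2 = 0 := by omega
            simp [hm2, h1]
          | succ i =>
            have h1 : (m - 1) / 2 = m / 2 - 1 := by omega
            have h2 : (2 * (m / 2 &&& (m / 2 - 1))) / 2 = m / 2 &&& (m / 2 - 1) := by omega
            rw [Nat.testBit_land, Nat.testBit_add_one m, Nat.testBit_add_one (m - 1),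
              Nat.testBit_add_one (2 * (m / 2 &&& (m / 2 - 1))), h1, h2, Nat.testBit_land]
        have hle : m / 2 &&& (m / 2 - 1) ≤ m / 2 := Nat.and_le_left
        rw [h, pow_succ]
        omega
      · rw [Nat.testBit_add_one]
        exact hk2

-- Int-level lsb: for 0 < u, u & -u = 2^k with u.toNat.testBit k
theorem int_lsb_spec {u : Int} (hu : 0 < u) :
    ∃ k, PySem.Int.band u (-u) = ((2 ^ k : Nat) : Int) ∧ u.toNat.testBit k = true := by
  have h1 : ¬ 0 ≤ -u := by omega
  obtain ⟨k, hk1, hk2⟩ := nat_lsb_spec u.toNat (by omega)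
  refine ⟨k, ?_, hk2⟩
  unfold PySem.Int.band
  rw [if_pos hu.le, if_neg h1]
  have : (-(-u) - 1).toNat = u.toNat - 1 := by omega
  rw [this, hk1]

theorem bitLength_two_pow (k : Nat) : PySem.Int.bitLength ((2 ^ k : Nat) : Int) = k + 1 := by
  have h1 := PySem.Int.lt_two_pow_bitLength ((2 ^ k : Nat) : Int)
  have h2 := PySem.Int.two_pow_bitLength_le ((2 ^ k : Nat) : Int) (by positivity)
  rw [Int.natAbs_natCast] at h1 h2
  have hk1 : k < PySem.Int.bitLength ((2 ^ k : Nat) : Int) :=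
    (Nat.pow_lt_pow_iff_right (by norm_num)).mp h1
  have hk2 : PySem.Int.bitLength ((2 ^ k : Nat) : Int) - 1 ≤ k :=
    (Nat.pow_le_pow_iff_right (by norm_num)).mp h2
  omega

theorem one_shiftLeft_eq (k : Nat) : (1 : Int) <<< k = ((2 ^ k : Nat) : Int) := by
  rw [Int.shiftLeft_eq]
  push_cast
  ring

-- ---- graph layer ----

-- edge relation read off the adjacency bitmasks (out-of-range reads as 0, never hit)
def gAdj (adj : List Int) (v w : Nat) : Bool := bitOf (adj.getD v 0) w

-- vertices reachable from s through vertices of the bit-set U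
inductive Reach (adj : List Int) (U : Nat) (s : Nat) : Nat → Prop
  | refl : Reach adj U s s
  | step {v w : Nat} : Reach adj U s v → gAdj adj v w = true → U.testBit w = true →
      Reach adj U s w

theorem bxor_nat_val {a b : Int} (ha : 0 ≤ a) (hb : 0 ≤ b) :
    PySem.Int.bxor a b = ((a.toNat ^^^ b.toNat : Nat) : Int) := by
  unfold PySem.Int.bxor
  rw [if_pos ha, if_pos hb]

theorem band_nat_val {a b : Int} (ha : 0 ≤ a) (hb : 0 ≤ b) :
    PySem.Int.band a b = ((a.toNat &&& b.toNat : Nat) : Int) := by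
  unfold PySem.Int.band
  rw [if_pos ha, if_pos hb]

theorem bxor_lsb {m : Int} (k : Nat) (hm : 0 ≤ m) (hk2 : m.toNat.testBit k = true) :
    PySem.Int.bxor m ((2 ^ k : Nat) : Int) = ((m.toNat - 2 ^ k : Nat) : Int) ∧
    (∀ v, (m.toNat - 2 ^ k).testBit v = (m.toNat.testBit v && !(decide (k = v)))) := by
  have hsub : ∀ v, (2 ^ k).testBit v = true → m.toNat.testBit v = true := by
    intro v hv
    rw [Nat.testBit_two_pow] at hv
    have : k = v := of_decide_eq_true hv
    subst this
    exact hk2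
  have hx : m.toNat ^^^ 2 ^ k = m.toNat - 2 ^ k := xor_eq_sub_of_subset hsub
  refine ⟨?_, ?_⟩
  · rw [bxor_nat_val hm (by positivity), Int.toNat_natCast, hx]
  · intro v
    rw [← hx, Nat.testBit_xor, Nat.testBit_two_pow]
    cases hmv : m.toNat.testBit v <;> cases hd : decide (k = v) <;> simp_all

theorem band_pow_ne_zero {c : Int} (hc : 0 ≤ c) (v : Nat) :
    (PySem.Int.band c ((1 : Int) <<< v) ≠ 0) ↔ c.toNat.testBit v = true := by
  rw [one_shiftLeft_eq, band_nat_val hc (by positivity), Int.toNat_natCast]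
  constructor
  · intro h
    by_contra hcv
    have hcv' : c.toNat.testBit v = false := by
      cases hx : c.toNat.testBit v
      · rfl
      · exact absurd hx hcv
    apply h
    have h0 : c.toNat &&& 2 ^ v = 0 := by
      apply Nat.eq_of_testBit_eq
      intro i
      rw [Nat.testBit_land, Nat.testBit_two_pow, Nat.zero_testBit]
      by_cases hiv : v = i
      · subst hiv; simp [hcv']
      · simp [hiv]
    rw [h0]
    simp
  · intro h hz
    have h0 : c.toNat &&& 2 ^ v = 0 := by exact_mod_cast hz
    have hb : (c.toNat &&& 2 ^ v).testBit v = false := by rw [h0]; exact Nat.zero_testBit v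
    rw [Nat.testBit_land, Nat.testBit_two_pow, h] at hb
    simp at hb

theorem two_pow_le_of_testBit {n k : Nat} (h : n.testBit k = true) : 2 ^ k ≤ n := by
  have hsub : ∀ v, (2 ^ k).testBit v = true → n.testBit v = true := by
    intro v hv
    rw [Nat.testBit_two_pow] at hv
    have : k = v := of_decide_eq_true hv
    subst this
    exact h
  calc 2 ^ k = n &&& 2 ^ k := (land_eq_of_subset hsub).symm
  _ ≤ n := Nat.and_le_left

theorem bitIter_spec : ∀ (fuel : Nat) (m : Int), 0 ≤ m → m.toNat + 1 ≤ fuel →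
    (bitIter fuel m).length ≤ m.toNat ∧
      (∀ v, v ∈ bitIter fuel m ↔ m.toNat.testBit v = true) := by
  intro fuel
  induction fuel with
  | zero => intro m hm hf; omega
  | succ f ih =>
    intro m hm hf
    by_cases h0 : m = 0
    · subst h0
      simp [bitIter]
    · have hpos : 0 < m := by omega
      obtain ⟨k, hk1, hk2⟩ := int_lsb_spec hpos
      obtain ⟨hval, hbits⟩ := bxor_lsb k hm hk2
      have hpow : 0 < 2 ^ k := by positivity
      have hle : 2 ^ k ≤ m.toNat := two_pow_le_of_testBit hk2
      have hlen : PySem.Int.bitLength ((2 ^ k : Nat) : Int) - 1 = k := by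
        rw [bitLength_two_pow]; omega
      have hstep : bitIter (f + 1) m = k :: bitIter f ((m.toNat - 2 ^ k : Nat) : Int) := by
        simp only [bitIter, if_neg h0]
        rw [hk1, hval, hlen]
      obtain ⟨ihl, ihm⟩ := ih ((m.toNat - 2 ^ k : Nat) : Int) (by positivity) (by
        rw [Int.toNat_natCast]; omega)
      rw [Int.toNat_natCast] at ihl ihm
      constructor
      · rw [hstep]
        simp only [List.length_cons]
        omega
      · intro v
        rw [hstep, List.mem_cons, ihm, hbits v]
        by_cases hv : v = k
        · subst hv
          simp [hk2]
        · simp [hv, Ne.symm hv]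

theorem band_mask_bits {a u : Int} (hu : 0 ≤ u) (w : Nat) :
    (PySem.Int.band a u).toNat.testBit w = (bitOf a w && u.toNat.testBit w) := by
  have h := bitOf_band a u w
  rw [bitOf_of_nonneg (band_nonneg_right a hu), bitOf_of_nonneg hu] at h
  exact h

theorem unseen_minus {u x : Int} (hu : 0 ≤ u) (hx : 0 ≤ x)
    (hsub : ∀ v, x.toNat.testBit v = true → u.toNat.testBit v = true) :
    PySem.Int.band u (Int.not x) = ((u.toNat - x.toNat : Nat) : Int) ∧
    (∀ v, (u.toNat - x.toNat).testBit v = (u.toNat.testBit v && !(x.toNat.testBit v))) := by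
  have hand : u.toNat &&& x.toNat = x.toNat := land_eq_of_subset hsub
  constructor
  · rw [band_not_val hu hx, hand]
  · intro v
    have h := testBit_sub_and u.toNat x.toNat v
    rw [hand] at h
    exact h

theorem orFrontier_spec (adj : List Int) : ∀ (fuel : Nat) (f acc : Int), 0 ≤ f →
    f.toNat + 1 ≤ fuel → ∀ w,
    (bitOf (orFrontier adj fuel f acc) w = true ↔
      bitOf acc w = true ∨ ∃ v, f.toNat.testBit v = true ∧ gAdj adj v w = true) := by
  intro fuel
  induction fuel with
  | zero => intro f acc hf hfu; omega
  | succ fu ih =>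
    intro f acc hf hfu w
    by_cases h0 : f = 0
    · subst h0
      simp [orFrontier]
    · have hpos : 0 < f := by omega
      obtain ⟨k, hk1, hk2⟩ := int_lsb_spec hpos
      obtain ⟨hval, hbits⟩ := bxor_lsb k hf hk2
      have hle : 2 ^ k ≤ f.toNat := two_pow_le_of_testBit hk2
      have hstep : orFrontier adj (fu + 1) f acc =
          orFrontier adj fu ((f.toNat - 2 ^ k : Nat) : Int)
            (PySem.Int.bor acc (adj.getD k 0)) := by
        simp only [orFrontier, if_neg h0]
        rw [hk1, hval, bitLength_two_pow]
        norm_num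
      rw [hstep, ih _ _ (by positivity) (by rw [Int.toNat_natCast]; have h1 : 1 ≤ 2 ^ k := Nat.one_le_two_pow; omega)]
      rw [Int.toNat_natCast]
      constructor
      · rintro (hacc | ⟨v, hv, hg⟩)
        · rw [bitOf_bor] at hacc
          rcases Bool.or_eq_true_iff.mp hacc with h | h
          · exact Or.inl h
          · exact Or.inr ⟨k, hk2, h⟩
        · rw [hbits v] at hv
          rcases Bool.and_eq_true_iff.mp hv with ⟨hv1, _⟩
          exact Or.inr ⟨v, hv1, hg⟩
      · rintro (hacc | ⟨v, hv, hg⟩)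
        · exact Or.inl (by rw [bitOf_bor, hacc]; simp)
        · by_cases hvk : v = k
          · subst hvk
            refine Or.inl ?_
            rw [bitOf_bor]
            unfold gAdj at hg
            rw [hg]
            simp
          · refine Or.inr ⟨v, ?_, hg⟩
            rw [hbits v, hv]
            simp [Ne.symm hvk]

-- ---- DFS loop invariant (port A) ----
def InvA (adj : List Int) (U s : Nat) (stack : List Nat) (comp unseen : Int) : Prop :=
  0 ≤ comp ∧ 0 ≤ unseen ∧
  (∀ v, unseen.toNat.testBit v = true → U.testBit v = true) ∧
  (∀ v, U.testBit v = true →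
    unseen.toNat.testBit v = true ∨ comp.toNat.testBit v = true ∨ v ∈ stack) ∧
  (∀ v, unseen.toNat.testBit v = true → comp.toNat.testBit v = false ∧ v ∉ stack) ∧
  (∀ v, comp.toNat.testBit v = true ∨ v ∈ stack → Reach adj U s v) ∧
  (∀ v w, comp.toNat.testBit v = true → gAdj adj v w = true → U.testBit w = true →
    unseen.toNat.testBit w = false) ∧
  (comp.toNat.testBit s = true ∨ s ∈ stack)

theorem aloop_inv (adj : List Int) (U s : Nat) : ∀ (fuel : Nat) (stack : List Nat)
    (comp unseen : Int), InvA adj U s stack comp unseen →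
    stack.length + 2 * unseen.toNat + 1 ≤ fuel →
    InvA adj U s [] (aloop adj fuel stack comp unseen).1 (aloop adj fuel stack comp unseen).2 := by
  intro fuel
  induction fuel with
  | zero => intro stack comp unseen hInv hf; omega
  | succ f ih =>
    intro stack comp unseen hInv hf
    obtain ⟨hc0, hu0, hI1, hI2, hI3, hI4, hI5, hI6⟩ := hInv
    match stack with
    | [] => exact ⟨hc0, hu0, hI1, hI2, hI3, hI4, hI5, hI6⟩
    | v :: rest =>
      by_cases hcv : PySem.Int.band comp ((1 : Int) <<< v) ≠ 0
      · -- revisit guard fires: v already in comp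
        have hvc : comp.toNat.testBit v = true := (band_pow_ne_zero hc0 v).mp hcv
        have hstep : aloop adj (f + 1) (v :: rest) comp unseen =
            aloop adj f rest comp unseen := by
          simp only [aloop, if_pos hcv]
        rw [hstep]
        apply ih rest comp unseen
        · refine ⟨hc0, hu0, hI1, ?_, ?_, ?_, hI5, ?_⟩
          · intro w hw
            rcases hI2 w hw with h | h | h
            · exact Or.inl h
            · exact Or.inr (Or.inl h)
            · rcases List.mem_cons.mp h with rfl | h
              · exact Or.inr (Or.inl hvc)
              · exact Or.inr (Or.inr h)
          · intro w hw
            obtain ⟨h1, h2⟩ := hI3 w hw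
            exact ⟨h1, fun hm => h2 (List.mem_cons_of_mem _ hm)⟩
          · intro w hw
            apply hI4
            rcases hw with h | h
            · exact Or.inl h
            · exact Or.inr (List.mem_cons_of_mem _ h)
          · rcases hI6 with h | h
            · exact Or.inl h
            · rcases List.mem_cons.mp h with rfl | h
              · exact Or.inl hvc
              · exact Or.inr h
        · simp only [List.length_cons] at hf
          omega
      · -- process v
        have hvc : comp.toNat.testBit v = false := by
          cases hx : comp.toNat.testBit v
          · rfl
          · exact absurd ((band_pow_ne_zero hc0 v).mpr hx) hcv
        have hbit : (1 : Int) <<< v = ((2 ^ v : Nat) : Int) := one_shiftLeft_eq v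
        -- comp' bits
        have hc0' : 0 ≤ PySem.Int.bor comp ((1 : Int) <<< v) := by
          rw [hbit]; exact bor_nonneg hc0 (by positivity)
        have hcbits : ∀ w, (PySem.Int.bor comp ((1 : Int) <<< v)).toNat.testBit w =
            (comp.toNat.testBit w || decide (v = w)) := by
          intro w
          have h := bitOf_bor comp ((1 : Int) <<< v) w
          rw [bitOf_of_nonneg hc0' , bitOf_of_nonneg hc0, hbit, bitOf_natCast,
            Nat.testBit_two_pow] at h
          rw [← hbit] at h
          exact h
        -- nbrs bits
        have hnb0 : 0 ≤ PySem.Int.band (PySem.List.pyGetD adj (v : Int) 0) unseen :=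
          band_nonneg_right _ hu0
        have hget : PySem.List.pyGetD adj (v : Int) 0 = adj.getD v 0 := by
          simp [PySem.List.pyGetD_natCast]
        have hnbits : ∀ w,
            (PySem.Int.band (PySem.List.pyGetD adj (v : Int) 0) unseen).toNat.testBit w =
            (gAdj adj v w && unseen.toNat.testBit w) := by
          intro w
          rw [band_mask_bits hu0, hget]
          rfl
        set nbrs := PySem.Int.band (PySem.List.pyGetD adj (v : Int) 0) unseen with hnbrs
        have hsub : ∀ w, nbrs.toNat.testBit w = true → unseen.toNat.testBit w = true := by
          intro w hw
          rw [hnbits w] at hw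
          exact (Bool.and_eq_true_iff.mp hw).2
        obtain ⟨huval, hubits⟩ := unseen_minus hu0 hnb0 hsub
        have hnle : nbrs.toNat ≤ unseen.toNat := by
          have := land_eq_of_subset hsub
          calc nbrs.toNat = unseen.toNat &&& nbrs.toNat := this.symm
          _ ≤ unseen.toNat := Nat.and_le_left
        obtain ⟨hblen, hbmem⟩ := bitIter_spec (nbrs.toNat + 1) nbrs hnb0 (by omega)
        have hstep : aloop adj (f + 1) (v :: rest) comp unseen =
            aloop adj f ((bitIter (nbrs.toNat + 1) nbrs).reverse ++ rest)
              (PySem.Int.bor comp ((1 : Int) <<< v))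
              (PySem.Int.band unseen (Int.not nbrs)) := by
          simp only [aloop, if_neg hcv]
          rfl
        rw [hstep, huval]
        have hmem : ∀ w, w ∈ (bitIter (nbrs.toNat + 1) nbrs).reverse ++ rest ↔
            (nbrs.toNat.testBit w = true ∨ w ∈ rest) := by
          intro w
          rw [List.mem_append, List.mem_reverse, hbmem w]
        have hreachv : Reach adj U s v := hI4 v (Or.inr (List.mem_cons_self))
        have hubits' : ∀ w, ((unseen.toNat - nbrs.toNat : Nat) : Int).toNat.testBit w =
            (unseen.toNat.testBit w && !(nbrs.toNat.testBit w)) := by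
          intro w
          rw [Int.toNat_natCast]
          exact hubits w
        apply ih
        · refine ⟨hc0', by positivity, ?_, ?_, ?_, ?_, ?_, ?_⟩
          · intro w hw
            rw [hubits' w] at hw
            exact hI1 w (Bool.and_eq_true_iff.mp hw).1
          · intro w hw
            rcases hI2 w hw with h | h | h
            · by_cases hn : nbrs.toNat.testBit w = true
              · exact Or.inr (Or.inr ((hmem w).mpr (Or.inl hn)))
              · refine Or.inl ?_
                rw [hubits' w, h]
                simp [Bool.eq_false_iff.mpr hn]
            · refine Or.inr (Or.inl ?_)
              rw [hcbits w, h]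
              simp
            · rcases List.mem_cons.mp h with rfl | h
              · refine Or.inr (Or.inl ?_)
                rw [hcbits w]
                simp
              · exact Or.inr (Or.inr ((hmem w).mpr (Or.inr h)))
          · intro w hw
            rw [hubits' w] at hw
            obtain ⟨hw1, hw2⟩ := Bool.and_eq_true_iff.mp hw
            obtain ⟨h1, h2⟩ := hI3 w hw1
            constructor
            · rw [hcbits w, h1]
              have : v ≠ w := by
                rintro rfl
                exact h2 List.mem_cons_self
              simp [this]
            · intro hm
              rcases (hmem w).mp hm with h | h
              · rw [h] at hw2
                simp at hw2
              · exact h2 (List.mem_cons_of_mem _ h)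
          · intro w hw
            rcases hw with h | h
            · rw [hcbits w] at h
              rcases Bool.or_eq_true_iff.mp h with h | h
              · exact hI4 w (Or.inl h)
              · have : v = w := of_decide_eq_true h
                subst this
                exact hreachv
            · rcases (hmem w).mp h with h | h
              · rw [hnbits w] at h
                obtain ⟨hg, hu⟩ := Bool.and_eq_true_iff.mp h
                exact Reach.step hreachv hg (hI1 w hu)
              · exact hI4 w (Or.inr (List.mem_cons_of_mem _ h))
          · intro x w hx hg hU
            rw [hubits' w]
            rw [hcbits x] at hx
            rcases Bool.or_eq_true_iff.mp hx with h | h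
            · rw [hI5 x w h hg hU]
              simp
            · have : v = x := of_decide_eq_true h
              subst this
              by_cases hu : unseen.toNat.testBit w = true
              · have : nbrs.toNat.testBit w = true := by
                  rw [hnbits w, hg, hu]
                  rfl
                rw [this]
                simp
              · rw [Bool.eq_false_iff.mpr hu]
                rfl
          · rcases hI6 with h | h
            · refine Or.inl ?_
              rw [hcbits s, h]
              rfl
            · rcases List.mem_cons.mp h with rfl | h
              · refine Or.inl ?_
                rw [hcbits s]
                simp
              · exact Or.inr ((hmem s).mpr (Or.inr h))
        · rw [Int.toNat_natCast]
          simp only [List.length_append, List.length_reverse, List.length_cons] at hf ⊢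
          omega

theorem finalA {adj : List Int} {U s : Nat} {c u : Int} (h : InvA adj U s [] c u) :
    0 ≤ c ∧ 0 ≤ u ∧ (∀ v, c.toNat.testBit v = true ↔ Reach adj U s v) ∧
    (∀ v, u.toNat.testBit v = (U.testBit v && !(c.toNat.testBit v))) := by
  obtain ⟨hc0, hu0, hI1, hI2, hI3, hI4, hI5, hI6⟩ := h
  have hclosed : ∀ v w, c.toNat.testBit v = true → gAdj adj v w = true →
      U.testBit w = true → c.toNat.testBit w = true := by
    intro v w hv hg hU
    rcases hI2 w hU with h | h | h
    · rw [hI5 v w hv hg hU] at h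
      exact absurd h (by simp)
    · exact h
    · simp at h
  have hreach : ∀ v, Reach adj U s v → c.toNat.testBit v = true := by
    intro v hr
    induction hr with
    | refl =>
      rcases hI6 with h | h
      · exact h
      · simp at h
    | step hv hg hU ih => exact hclosed _ _ ih hg hU
  refine ⟨hc0, hu0, fun v => ⟨fun hv => hI4 v (Or.inl hv), hreach v⟩, ?_⟩
  intro v
  cases hU : U.testBit v
  · cases hu : u.toNat.testBit v
    · rfl
    · rw [hI1 v hu] at hU
      simp at hU
  · cases hc : c.toNat.testBit v
    · rcases hI2 v (by rw [hU]) with h | h | h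
      · rw [h]; rfl
      · rw [h] at hc; simp at hc
      · simp at h
    · have hufalse : u.toNat.testBit v = false := by
        cases hu : u.toNat.testBit v
        · rfl
        · rw [(hI3 v hu).1] at hc
          simp at hc
      rw [hufalse]
      rfl

-- ---- BFS loop invariant (port B) ----
def InvB (adj : List Int) (U s : Nat) (frontier comp unseen : Int) : Prop :=
  0 ≤ frontier ∧ 0 ≤ comp ∧ 0 ≤ unseen ∧
  (∀ v, unseen.toNat.testBit v = true → U.testBit v = true) ∧
  (∀ v, U.testBit v = true → unseen.toNat.testBit v = true ∨ comp.toNat.testBit v = true) ∧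
  (∀ v, unseen.toNat.testBit v = true → comp.toNat.testBit v = false) ∧
  (∀ v, frontier.toNat.testBit v = true → comp.toNat.testBit v = true) ∧
  (∀ v, comp.toNat.testBit v = true → Reach adj U s v) ∧
  (∀ v w, comp.toNat.testBit v = true → frontier.toNat.testBit v = false →
    gAdj adj v w = true → U.testBit w = true → unseen.toNat.testBit w = false) ∧
  comp.toNat.testBit s = true

theorem bloop_inv (adj : List Int) (U s : Nat) : ∀ (fuel : Nat) (frontier comp unseen : Int),
    InvB adj U s frontier comp unseen → unseen.toNat + 2 ≤ fuel →
    InvB adj U s 0 (bloop adj fuel frontier comp unseen).1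
      (bloop adj fuel frontier comp unseen).2 := by
  intro fuel
  induction fuel with
  | zero => intro frontier comp unseen hInv hfu; omega
  | succ f ih =>
    intro frontier comp unseen hInv hfu
    obtain ⟨hf0, hc0, hu0, hJ1, hJ2, hJ3, hJ4, hJ5, hJ6, hJ7⟩ := hInv
    by_cases h0 : frontier = 0
    · subst h0
      have hstep : bloop adj (f + 1) 0 comp unseen = (comp, unseen) := by
        simp [bloop]
      rw [hstep]
      exact ⟨le_refl 0, hc0, hu0, hJ1, hJ2, hJ3, hJ4, hJ5, hJ6, hJ7⟩
    · have hor := orFrontier_spec adj (frontier.toNat + 1) frontier 0 hf0 (by omega)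
      set res := orFrontier adj (frontier.toNat + 1) frontier 0 with hres
      have horbits : ∀ w, bitOf res w = true ↔
          ∃ v, frontier.toNat.testBit v = true ∧ gAdj adj v w = true := by
        intro w
        have hb0 : bitOf (0 : Int) w = false := by simp [bitOf]
        rw [hor w, hb0]
        simp
      set nw := PySem.Int.band res unseen with hnw
      have hnw0 : 0 ≤ nw := band_nonneg_right _ hu0
      have hnwbits : ∀ w, nw.toNat.testBit w = true ↔
          ((∃ v, frontier.toNat.testBit v = true ∧ gAdj adj v w = true) ∧
            unseen.toNat.testBit w = true) := by
        intro w
        rw [hnw, band_mask_bits hu0, Bool.and_eq_true_iff]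
        exact and_congr_left fun _ => horbits w
      have hsub : ∀ w, nw.toNat.testBit w = true → unseen.toNat.testBit w = true := by
        intro w hw
        exact ((hnwbits w).mp hw).2
      obtain ⟨huval, hubits⟩ := unseen_minus hu0 hnw0 hsub
      have hnle : nw.toNat ≤ unseen.toNat := by
        have := land_eq_of_subset hsub
        calc nw.toNat = unseen.toNat &&& nw.toNat := this.symm
        _ ≤ unseen.toNat := Nat.and_le_left
      have hstep : bloop adj (f + 1) frontier comp unseen =
          bloop adj f nw (PySem.Int.bor comp nw) (PySem.Int.band unseen (Int.not nw)) := by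
        simp only [bloop, if_neg h0]
        rfl
      -- comp' bits
      have hc0' : 0 ≤ PySem.Int.bor comp nw := bor_nonneg hc0 hnw0
      have hcbits : ∀ w, (PySem.Int.bor comp nw).toNat.testBit w =
          (comp.toNat.testBit w || nw.toNat.testBit w) := by
        intro w
        have h := bitOf_bor comp nw w
        rw [bitOf_of_nonneg hc0', bitOf_of_nonneg hc0, bitOf_of_nonneg hnw0] at h
        exact h
      have hubits' : ∀ w, ((unseen.toNat - nw.toNat : Nat) : Int).toNat.testBit w =
          (unseen.toNat.testBit w && !(nw.toNat.testBit w)) := by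
        intro w
        rw [Int.toNat_natCast]
        exact hubits w
      have hInv' : InvB adj U s nw (PySem.Int.bor comp nw)
          (PySem.Int.band unseen (Int.not nw)) := by
        rw [huval]
        refine ⟨hnw0, hc0', by positivity, ?_, ?_, ?_, ?_, ?_, ?_, ?_⟩
        · intro w hw
          rw [hubits' w] at hw
          exact hJ1 w (Bool.and_eq_true_iff.mp hw).1
        · intro w hw
          rcases hJ2 w hw with h | h
          · by_cases hn : nw.toNat.testBit w = true
            · refine Or.inr ?_
              rw [hcbits w, hn]
              simp
            · refine Or.inl ?_
              rw [hubits' w, h]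
              simp [Bool.eq_false_iff.mpr hn]
          · refine Or.inr ?_
            rw [hcbits w, h]
            rfl
        · intro w hw
          rw [hubits' w] at hw
          obtain ⟨hw1, hw2⟩ := Bool.and_eq_true_iff.mp hw
          rw [hcbits w, (hJ3 w hw1)]
          simpa using hw2
        · intro w hw
          rw [hcbits w, hw]
          simp
        · intro w hw
          rw [hcbits w] at hw
          rcases Bool.or_eq_true_iff.mp hw with h | h
          · exact hJ5 w h
          · obtain ⟨⟨x, hx1, hx2⟩, hwu⟩ := (hnwbits w).mp h
            exact Reach.step (hJ5 x (hJ4 x hx1)) hx2 (hJ1 w hwu)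
        · intro x w hx hfr hg hU
          rw [hubits' w]
          rw [hcbits x] at hx
          rcases Bool.or_eq_true_iff.mp hx with h | h
          · by_cases hxf : frontier.toNat.testBit x = true
            · by_cases hwu : unseen.toNat.testBit w = true
              · have : nw.toNat.testBit w = true := (hnwbits w).mpr ⟨⟨x, hxf, hg⟩, hwu⟩
                rw [this]
                simp
              · rw [Bool.eq_false_iff.mpr hwu]
                rfl
            · rw [hJ6 x w h (Bool.eq_false_iff.mpr hxf) hg hU]
              simp
          · rw [h] at hfr
            simp at hfr
        · rw [hcbits s, hJ7]
          rfl
      by_cases hnwz : nw = 0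
      · -- empty level: the next iteration exits with the state unchanged
        rw [hstep]
        have hnwz' : nw.toNat = 0 := by omega
        obtain ⟨f', rfl⟩ : ∃ f', f = f' + 1 := ⟨f - 1, by omega⟩
        · have hstep2 : bloop adj (f' + 1) nw (PySem.Int.bor comp nw)
              (PySem.Int.band unseen (Int.not nw)) =
              (PySem.Int.bor comp nw, PySem.Int.band unseen (Int.not nw)) := by
            rw [hnwz]
            simp [bloop]
          rw [hstep2]
          obtain ⟨k1, k2, k3, k4, k5, k6, k7, k8, k9, k10⟩ := hInv'
          refine ⟨le_refl 0, k2, k3, k4, k5, k6, ?_, k8, ?_, k10⟩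
          · intro x hx
            simp at hx
          · intro x w hx _ hg hU
            apply k9 x w hx ?_ hg hU
            rw [hnwz]
            simp
      · rw [hstep]
        apply ih _ _ _ hInv'
        rw [huval, Int.toNat_natCast]
        have : 1 ≤ nw.toNat := by omega
        omega

theorem finalB {adj : List Int} {U s : Nat} {c u : Int} (h : InvB adj U s 0 c u) :
    0 ≤ c ∧ 0 ≤ u ∧ (∀ v, c.toNat.testBit v = true ↔ Reach adj U s v) ∧
    (∀ v, u.toNat.testBit v = (U.testBit v && !(c.toNat.testBit v))) := by
  obtain ⟨_, hc0, hu0, hJ1, hJ2, hJ3, hJ4, hJ5, hJ6, hJ7⟩ := h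
  have hclosed : ∀ v w, c.toNat.testBit v = true → gAdj adj v w = true →
      U.testBit w = true → c.toNat.testBit w = true := by
    intro v w hv hg hU
    have hnu : u.toNat.testBit w = false := hJ6 v w hv (by simp) hg hU
    rcases hJ2 w hU with h | h
    · rw [hnu] at h
      exact absurd h (by simp)
    · exact h
  have hreach : ∀ v, Reach adj U s v → c.toNat.testBit v = true := by
    intro v hr
    induction hr with
    | refl => exact hJ7
    | step hv hg hU ih => exact hclosed _ _ ih hg hU
  refine ⟨hc0, hu0, fun v => ⟨hJ5 v, hreach v⟩, ?_⟩
  intro v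
  cases hU : U.testBit v
  · cases hu : u.toNat.testBit v
    · rfl
    · rw [hJ1 v hu] at hU
      simp at hU
  · cases hc : c.toNat.testBit v
    · rcases hJ2 v (by rw [hU]) with h | h
      · rw [h]
        rfl
      · rw [h] at hc
        simp at hc
    · have hufalse : u.toNat.testBit v = false := by
        cases hu : u.toNat.testBit v
        · rfl
        · rw [hJ3 v hu] at hc
          simp at hc
      rw [hufalse]
      rfl

theorem int_eq_of_testBit {a b : Int} (ha : 0 ≤ a) (hb : 0 ≤ b)
    (h : ∀ v, a.toNat.testBit v = b.toNat.testBit v) : a = b := by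
  have := Nat.eq_of_testBit_eq h
  omega

theorem outer_eq (adj : List Int) : ∀ (fuel : Nat) (unseen : Int) (acc : List Int),
    0 ≤ unseen → aouter adj fuel unseen acc = bouter adj fuel unseen acc := by
  intro fuel
  induction fuel with
  | zero => intro unseen acc hu; rfl
  | succ f ih =>
    intro unseen acc hu
    by_cases h0 : unseen = 0
    · subst h0
      simp [aouter, bouter]
    · have hpos : 0 < unseen := by omega
      obtain ⟨k, hk1, hk2⟩ := int_lsb_spec hpos
      obtain ⟨hval, hbits⟩ := bxor_lsb k hu hk2
      set U' := ((unseen.toNat - 2 ^ k : Nat) : Int) with hU'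
      have hU'0 : (0 : Int) ≤ U' := by positivity
      have hUbit : ∀ v, U'.toNat.testBit v =
          (unseen.toNat.testBit v && !(decide (k = v))) := by
        intro v
        rw [hU', Int.toNat_natCast]
        exact hbits v
      have hUk : U'.toNat.testBit k = false := by
        rw [hUbit k]
        simp
      have hstepA : aouter adj (f + 1) unseen acc =
          aouter adj f (aloop adj (2 * U'.toNat + 2) [k] 0 U').2
            (acc ++ [(aloop adj (2 * U'.toNat + 2) [k] 0 U').1]) := by
        simp only [aouter, if_neg h0]
        rw [hk1, bitLength_two_pow, hval]
        norm_num
      have hstepB : bouter adj (f + 1) unseen acc =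
          bouter adj f (bloop adj (U'.toNat + 2) ((2 ^ k : Nat) : Int) ((2 ^ k : Nat) : Int) U').2
            (acc ++ [(bloop adj (U'.toNat + 2) ((2 ^ k : Nat) : Int) ((2 ^ k : Nat) : Int) U').1]) := by
        simp only [bouter, if_neg h0]
        rw [hk1, hval]
      have hpbits : ∀ v, (((2 ^ k : Nat) : Int)).toNat.testBit v = decide (k = v) := by
        intro v
        rw [Int.toNat_natCast, Nat.testBit_two_pow]
      have hInvA : InvA adj U'.toNat k [k] 0 U' := by
        refine ⟨le_refl 0, hU'0, fun v h => h, fun v h => Or.inl h, ?_, ?_, ?_, ?_⟩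
        · intro v hv
          refine ⟨by simp, ?_⟩
          intro hm
          rcases List.mem_singleton.mp hm with rfl
          rw [hUk] at hv
          exact absurd hv (by simp)
        · intro v hv
          rcases hv with h | h
          · simp at h
          · rcases List.mem_singleton.mp h with rfl
            exact Reach.refl
        · intro v w hv
          simp at hv
        · exact Or.inr (List.mem_singleton.mpr rfl)
      have hInvB : InvB adj U'.toNat k ((2 ^ k : Nat) : Int) ((2 ^ k : Nat) : Int) U' := by
        refine ⟨by positivity, by positivity, hU'0, fun v h => h, fun v h => Or.inl h,
          ?_, fun v h => h, ?_, ?_, ?_⟩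
        · intro v hv
          rw [hpbits v]
          by_cases hkv : k = v
          · subst hkv
            rw [hUk] at hv
            exact absurd hv (by simp)
          · simp [hkv]
        · intro v hv
          rw [hpbits v] at hv
          rcases of_decide_eq_true hv
          exact Reach.refl
        · intro x w hx hfr
          rw [hpbits x] at hx hfr
          rw [hx] at hfr
          simp at hfr
        · rw [hpbits k]
          simp
      have hA := aloop_inv adj U'.toNat k (2 * U'.toNat + 2) [k] 0 U' hInvA (by simp only [List.length_cons, List.length_nil]; omega)
      have hB := bloop_inv adj U'.toNat k (U'.toNat + 2) ((2 ^ k : Nat) : Int)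
        ((2 ^ k : Nat) : Int) U' hInvB (by omega)
      obtain ⟨ca0, ua0, cabits, uabits⟩ := finalA hA
      obtain ⟨cb0, ub0, cbbits, ubbits⟩ := finalB hB
      have hceq : (aloop adj (2 * U'.toNat + 2) [k] 0 U').1 =
          (bloop adj (U'.toNat + 2) ((2 ^ k : Nat) : Int) ((2 ^ k : Nat) : Int) U').1 := by
        apply int_eq_of_testBit ca0 cb0
        intro v
        rw [Bool.eq_iff_iff, cabits v, cbbits v]
      have hueq : (aloop adj (2 * U'.toNat + 2) [k] 0 U').2 =
          (bloop adj (U'.toNat + 2) ((2 ^ k : Nat) : Int) ((2 ^ k : Nat) : Int) U').2 := by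
        apply int_eq_of_testBit ua0 ub0
        intro v
        rw [uabits v, ubbits v, hceq]
      rw [hstepA, hstepB, hceq, hueq]
      exact ih _ _ ub0

-- ===== VERDICT (by name: the statement is the Claim_ definition above) =====
theorem component_masks_spec : Claim_equal_component_masks := by
  intro adj _
  unfold Spec_component_masks component_masks component_masks_alt
  apply outer_eq
  rw [one_shiftLeft_eq]
  have : 1 ≤ 2 ^ adj.length := Nat.one_le_two_pow
  omega
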